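-- pv_equiv track=rewrite | github.com/wpedrak/advent_of_code_2018 | 03/solution2.py | mark_on_fabric
-- ===== SOURCE A (Python) =====
-- def mark_on_fabric(fabric, x, y, width, height):
--     new_ones = 0
--     for y_delta in range(height):
--         for x_delta in range(width):
--             fabric[y+y_delta][x+x_delta] += 1
--             if fabric[y+y_delta][x+x_delta] == 1:
--                 new_ones += 1
--
--     return new_ones
-- ===== SOURCE B (Python) =====
-- def mark_on_fabric(fabric, x, y, width, height):
--     w = max(width, 0)
--     # Pass 1: count cells that will become 1 = cells currently equal to 0.
--     new_ones = sum(fabric[y + d][x:x + w].count(0) for d in range(height))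
--     # Pass 2: increment every cell of the rectangle (same in-place mutation as A).
--     for d in range(height):
--         row = fabric[y + d]
--         row[x:x + w] = [v + 1 for v in row[x:x + w]]
--     return new_ones
-- ===== Notes on version B (the rewrite author's own statement) =====
-- stated objective: alternative
-- what changed: A interleaves increment and test per cell in a nested loop; B first counts the rectangle's zero cells row-wise with a slice-and-count pass and then bulk-increments each row via slice assignment, so the returned count comes from a counting pass over the untouched fabric instead of per-cell increment-then-compare.
-- outside the precondition, e.g. on mark_on_fabric([[0, 0]], -1, 0, 1, 1): A returns 1, B returns 0; on mark_on_fabric([], 0, 5, -1, 1): A returns 0, B raises IndexError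
import Mathlib
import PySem

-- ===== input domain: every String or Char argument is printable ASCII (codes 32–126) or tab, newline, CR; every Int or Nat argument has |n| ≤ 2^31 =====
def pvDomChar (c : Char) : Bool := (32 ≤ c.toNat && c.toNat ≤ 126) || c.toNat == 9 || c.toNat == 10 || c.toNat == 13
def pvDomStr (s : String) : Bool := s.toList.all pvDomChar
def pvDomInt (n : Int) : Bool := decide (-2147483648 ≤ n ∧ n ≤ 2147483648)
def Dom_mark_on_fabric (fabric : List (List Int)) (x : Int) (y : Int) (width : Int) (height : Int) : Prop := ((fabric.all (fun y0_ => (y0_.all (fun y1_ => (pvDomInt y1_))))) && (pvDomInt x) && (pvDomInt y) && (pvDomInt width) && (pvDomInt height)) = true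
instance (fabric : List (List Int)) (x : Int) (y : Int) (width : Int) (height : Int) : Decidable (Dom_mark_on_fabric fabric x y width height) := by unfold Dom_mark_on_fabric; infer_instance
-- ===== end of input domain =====

-- B replaces A's per-cell increment-then-test with a counting pass (zeros per row via a slice) followed by a
-- bulk increment pass; equivalence is about the RETURN value (both Pythons mutate `fabric` in place the same
-- way on Pre_; B's second pass has no effect on the return value and is therefore not part of the Lean port).

-- ===== PORT A =====
-- body of A's inner loop: fabric[y+yd][x+xd] += 1; if fabric[y+yd][x+xd] == 1: new_ones += 1
-- (pyGetD/pySetD are exact under Pre_, which puts every accessed index in range)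
def pvAInner (y x yd : Int) (st : List (List Int) × Int) (xd : Int) : List (List Int) × Int :=
  let row := PySem.List.pyGetD st.1 (y + yd) []
  let v := PySem.List.pyGetD row (x + xd) 0 + 1
  (PySem.List.pySetD st.1 (y + yd) (PySem.List.pySetD row (x + xd) v),
   if v == 1 then st.2 + 1 else st.2)

def mark_on_fabric (fabric : List (List Int)) (x : Int) (y : Int) (width : Int) (height : Int) : Int :=
  ((PySem.List.pyRange 0 height 1).foldl
    (fun st yd => (PySem.List.pyRange 0 width 1).foldl (pvAInner y x yd) st)
    (fabric, 0)).2

-- ===== PORT B =====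
-- pass 1 of Source B: sum(fabric[y+d][x:x+w].count(0) for d in range(height)) with w = max(width, 0);
-- pass 2 only mutates the argument in place and does not touch the return value, so it has no Lean counterpart
def mark_on_fabric_alt (fabric : List (List Int)) (x : Int) (y : Int) (width : Int) (height : Int) : Int :=
  let w := max width 0
  ((PySem.List.pyRange 0 height 1).map (fun d =>
    ((PySem.List.slice (PySem.List.pyGetD fabric (y + d) []) (some x) (some (x + w))).count 0 : Int))).sum

-- ===== PRECONDITION & SPEC =====
-- Pre_ excludes rectangles that stick out of the fabric's 0-based frame: there A raises IndexError or reaches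
-- cells through Python's accidental negative-index wraparound, which B's slice-based passes reproduce only
-- sometimes (negative x clamps to an empty slice; with width <= 0 B still indexes rows A never touches).
def Pre_mark_on_fabric (fabric : List (List Int)) (x : Int) (y : Int) (width : Int) (height : Int) : Prop :=
  height ≤ 0 ∨
    (0 ≤ y ∧ y + height ≤ (fabric.length : Int) ∧
      (width ≤ 0 ∨
        (0 ≤ x ∧ ∀ r ∈ (fabric.drop y.toNat).take height.toNat, x + width ≤ (r.length : Int))))
instance (fabric : List (List Int)) (x : Int) (y : Int) (width : Int) (height : Int) : Decidable (Pre_mark_on_fabric fabric x y width height) := by unfold Pre_mark_on_fabric; infer_instance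

def pvWitness_mark_on_fabric : List (List Int) × Int × Int × Int × Int := ([[0, 3], [1, 0]], 0, 0, 2, 2)

def Spec_mark_on_fabric (fabric : List (List Int)) (x : Int) (y : Int) (width : Int) (height : Int) (out : Int) : Prop := out = mark_on_fabric_alt fabric x y width height
instance (fabric : List (List Int)) (x : Int) (y : Int) (width : Int) (height : Int) (out : Int) : Decidable (Spec_mark_on_fabric fabric x y width height out) := by unfold Spec_mark_on_fabric; infer_instance

-- ===== CLAIM (what is proved, stated in full; the proofs are below) =====
def Claim_equal_mark_on_fabric : Prop := ∀ (fabric : List (List Int)) (x : Int) (y : Int) (width : Int) (height : Int), Dom_mark_on_fabric fabric x y width height → Pre_mark_on_fabric fabric x y width height → Spec_mark_on_fabric fabric x y width height (mark_on_fabric fabric x y width height)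

-- ===== LEMMAS AND PROOFS =====

-- row-level view of A's inner-loop body, acting on the row alone
def pvRowStep (x : Int) (st : List Int × Int) (xd : Int) : List Int × Int :=
  let v := PySem.List.pyGetD st.1 (x + xd) 0 + 1
  (PySem.List.pySetD st.1 (x + xd) v, if v == 1 then st.2 + 1 else st.2)

theorem pv_pyRange_nonpos (h : Int) (hh : h ≤ 0) : PySem.List.pyRange 0 h 1 = ([] : List Int) := by
  simp [PySem.List.pyRange]; omega

theorem pv_slice_self {α : Type} (xs : List α) (a : Int) :
    PySem.List.slice xs (some a) (some a) = [] := by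
  simp [PySem.List.slice]

-- A's inner loop only rewrites row R of the fabric: it factors through pvRowStep
theorem pv_factor (y x yd : Int) (R : Nat) (hyd : y + yd = (R : Int)) :
    ∀ (l : List Int) (fab : List (List Int)) (row : List Int) (cnt : Int), R < fab.length →
      l.foldl (pvAInner y x yd) (fab.set R row, cnt)
        = (fab.set R (l.foldl (pvRowStep x) (row, cnt)).1, (l.foldl (pvRowStep x) (row, cnt)).2) := by
  intro l
  induction l with
  | nil => intro fab row cnt _; simp
  | cons a t ih =>
    intro fab row cnt hR
    have hget : PySem.List.pyGetD (fab.set R row) ((R : Nat) : Int) [] = row := by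
      rw [PySem.List.pyGetD_natCast, List.getD_eq_getElem?_getD]
      simp [hR]
    have hstep : pvAInner y x yd (fab.set R row, cnt) a
        = (fab.set R (pvRowStep x (row, cnt) a).1, (pvRowStep x (row, cnt) a).2) := by
      simp only [pvAInner, pvRowStep, hyd, hget, PySem.List.pySetD_natCast, List.set_set]
    rw [List.foldl_cons, hstep, List.foldl_cons, ih _ _ _ (by simpa using hR)]

-- the row-level loop counts the zeros of the window and writes only inside it
theorem pv_rowfold (X : Nat) (row : List Int) (cnt : Int) :
    ∀ (k : Nat), X + k ≤ row.length →
      (((List.range k).map (fun j : Nat => (j : Int))).foldl (pvRowStep (X : Int)) (row, cnt)).1.length = row.length ∧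
      (((List.range k).map (fun j : Nat => (j : Int))).foldl (pvRowStep (X : Int)) (row, cnt)).2
        = cnt + (((row.drop X).take k).count 0 : Nat) := by
  intro k
  induction k with
  | zero => intro _; simp
  | succ k ih =>
    intro hk
    have hk' : X + k ≤ row.length := by omega
    obtain ⟨ihlen, ihcnt⟩ := ih hk'
    -- strengthen: positions ≥ X + k are untouched after k steps
    have huntouched : ∀ (k : Nat), X + k ≤ row.length →
        ∀ m, X + k ≤ m →
          ((((List.range k).map (fun j : Nat => (j : Int))).foldl (pvRowStep (X : Int)) (row, cnt)).1)[m]? = row[m]? := by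
      intro k
      induction k with
      | zero => intro _ m _; rfl
      | succ k ih2 =>
        intro hk m hm
        rw [List.range_succ, List.map_append, List.foldl_append]
        have hk' : X + k ≤ row.length := by omega
        simp only [List.map_cons, List.map_nil, List.foldl_cons, List.foldl_nil]
        simp only [pvRowStep]
        have hx : (X : Int) + (k : Int) = ((X + k : Nat) : Int) := by omega
        rw [hx, PySem.List.pySetD_natCast]
        rw [List.getElem?_set_ne (by omega)]
        exact ih2 hk' m (by omega)
    rw [List.range_succ, List.map_append, List.foldl_append]
    simp only [List.map_cons, List.map_nil, List.foldl_cons, List.foldl_nil]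
    simp only [pvRowStep]
    have hx : (X : Int) + (k : Int) = ((X + k : Nat) : Int) := by omega
    have hlt : X + k < row.length := by omega
    have hread : PySem.List.pyGetD (((List.range k).map (fun j : Nat => (j : Int))).foldl (pvRowStep (X : Int)) (row, cnt)).1 ((X : Int) + (k : Int)) 0
        = row[X + k] := by
      rw [hx, PySem.List.pyGetD_natCast, List.getD_eq_getElem?_getD, huntouched k hk' (X + k) (le_refl _)]
      simp [hlt]
    constructor
    · rw [hx, PySem.List.pySetD_natCast]
      simpa using ihlen
    · rw [hread, ihcnt]
      have htake : (row.drop X).take (k + 1) = (row.drop X).take k ++ [row[X + k]] := by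
        have hlen : k < (row.drop X).length := by simp; omega
        rw [List.take_succ_eq_append_getElem hlen]
        congr 1
        simp [List.getElem_drop]
      rw [htake, List.count_append]
      by_cases h0 : row[X + k] = 0
      · simp [h0]; ring
      · have : ¬ (row[X + k] + 1 == 1) = true := by simp; omega
        simp [this, h0]

-- the outer loop: after k rows the later rows are untouched and the count is the sum of per-row zero counts
theorem pv_outer (fabric : List (List Int)) (X Y W H : Nat)
    (hYH : Y + H ≤ fabric.length)
    (hrows : ∀ m, Y ≤ m → m < Y + H → X + W ≤ (fabric.getD m []).length) :
    ∀ (k : Nat), k ≤ H →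
      (((List.range k).map (fun j : Nat => (j : Int))).foldl
          (fun st yd => ((List.range W).map (fun j : Nat => (j : Int))).foldl (pvAInner (Y : Int) (X : Int) yd) st)
          (fabric, 0)).1.length = fabric.length ∧
      (∀ m, Y + k ≤ m →
        ((((List.range k).map (fun j : Nat => (j : Int))).foldl
          (fun st yd => ((List.range W).map (fun j : Nat => (j : Int))).foldl (pvAInner (Y : Int) (X : Int) yd) st)
          (fabric, 0)).1)[m]? = fabric[m]?) ∧
      (((List.range k).map (fun j : Nat => (j : Int))).foldl
          (fun st yd => ((List.range W).map (fun j : Nat => (j : Int))).foldl (pvAInner (Y : Int) (X : Int) yd) st)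
          (fabric, 0)).2
        = (((List.range k).map (fun j : Nat =>
            ((((fabric.getD (Y + j) []).drop X).take W).count 0 : Int))).sum) := by
  intro k
  induction k with
  | zero => intro _; refine ⟨rfl, fun m _ => rfl, by simp⟩
  | succ k ih =>
    intro hk
    obtain ⟨ihlen, ihagree, ihcnt⟩ := ih (by omega)
    rw [List.range_succ, List.map_append, List.foldl_append]
    set res := ((List.range k).map (fun j : Nat => (j : Int))).foldl
        (fun st yd => ((List.range W).map (fun j : Nat => (j : Int))).foldl (pvAInner (Y : Int) (X : Int) yd) st)
        (fabric, 0) with hres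
    simp only [List.map_cons, List.map_nil, List.foldl_cons, List.foldl_nil]
    have hRlt : Y + k < res.1.length := by rw [ihlen]; omega
    set row := fabric.getD (Y + k) [] with hrowdef
    have hrowlen : X + W ≤ row.length := hrows (Y + k) (by omega) (by omega)
    have hrowval : res.1[Y + k]'hRlt = row := by
      have h1 : res.1[Y + k]? = fabric[Y + k]? := ihagree (Y + k) (le_refl _)
      have h2 : fabric[Y + k]? = some row := by
        rw [hrowdef, List.getD_eq_getElem?_getD]
        have : Y + k < fabric.length := by omega
        simp [this]
      rw [List.getElem_eq_iff hRlt, h1, h2]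
    have hset : res.1.set (Y + k) row = res.1 := by
      rw [← hrowval]; exact List.set_getElem_self hRlt
    have hfac := pv_factor (Y : Int) (X : Int) (k : Int) (Y + k) (by push_cast; ring)
        ((List.range W).map (fun j : Nat => (j : Int))) res.1 row res.2 (by omega)
    rw [hset] at hfac
    have hrf := pv_rowfold X row res.2 W hrowlen
    have hst : (res.1, res.2) = res := rfl
    rw [hst] at hfac
    refine ⟨?_, ?_, ?_⟩
    · rw [hfac]; simpa using ihlen
    · intro m hm
      rw [hfac]
      simp only
      rw [List.getElem?_set_ne (by omega)]
      exact ihagree m (by omega)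
    · rw [hfac]
      simp only
      rw [hrf.2, ihcnt, List.map_append, List.sum_append]
      simp [hrowdef, List.getD_eq_getElem?_getD]

-- bridge: rewrite a pyRange of a positive Int bound into a mapped List.range
theorem pv_pyRange_pos (h : Int) (hh : 0 < h) :
    PySem.List.pyRange 0 h 1 = (List.range h.toNat).map (fun j : Nat => (j : Int)) := by
  have h1 : h = ((h.toNat : Nat) : Int) := by omega
  conv_lhs => rw [h1]
  rw [PySem.List.pyRange_zero_natCast]

theorem mark_on_fabric_spec : Claim_equal_mark_on_fabric := by
  intro fabric x y width height _ hpre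
  unfold Spec_mark_on_fabric mark_on_fabric mark_on_fabric_alt
  rcases hpre with hh | ⟨hy, hyh, hrest⟩
  · rw [pv_pyRange_nonpos height hh]; simp
  by_cases hhpos : height ≤ 0
  · rw [pv_pyRange_nonpos height hhpos]; simp
  push Not at hhpos
  rcases hrest with hw | ⟨hx, hrows⟩
  · -- width ≤ 0: inner loop empty, slices empty
    rw [pv_pyRange_nonpos width hw]
    have hmax : max width 0 = 0 := by omega
    simp [hmax, pv_slice_self, List.foldl_fixed]
  · -- main case: the rectangle lies inside the fabric
    by_cases hw : width ≤ 0
    · rw [pv_pyRange_nonpos width hw]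
      have hmax : max width 0 = 0 := by omega
      simp [hmax, pv_slice_self, List.foldl_fixed]
    push Not at hw
    have hmax : max width 0 = width := by omega
    have hxX : x = ((x.toNat : Nat) : Int) := by omega
    have hyY : y = ((y.toNat : Nat) : Int) := by omega
    have hwW : width = ((width.toNat : Nat) : Int) := by omega
    have hYH : y.toNat + height.toNat ≤ fabric.length := by omega
    have hrows' : ∀ m, y.toNat ≤ m → m < y.toNat + height.toNat → x.toNat + width.toNat ≤ (fabric.getD m []).length := by
      intro m hm1 hm2
      have hmlt : m < fabric.length := by omega
      have hmem : fabric.getD m [] ∈ (fabric.drop y.toNat).take height.toNat := by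
        rw [List.getD_eq_getElem?_getD]
        have hsome : fabric[m]? = some fabric[m] := by simp [hmlt]
        rw [hsome]
        simp only [Option.getD_some]
        rw [List.mem_take_iff_getElem]
        refine ⟨m - y.toNat, by simp; omega, ?_⟩
        rw [List.getElem_drop]
        congr 1
        omega
      have := hrows _ hmem
      omega
    have houter := pv_outer fabric x.toNat y.toNat width.toNat height.toNat hYH hrows' height.toNat (le_refl _)
    rw [pv_pyRange_pos height (by omega), pv_pyRange_pos width (by omega)]
    conv_lhs => rw [hyY, hxX]
    rw [houter.2.2, hmax]
    simp only [List.map_map]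
    congr 1
    apply List.map_congr_left
    intro j hj
    rw [List.mem_range] at hj
    rw [Function.comp_apply]
    symm
    have harg : y + (j : Int) = (((y.toNat + j : Nat)) : Int) := by omega
    rw [harg, PySem.List.pyGetD_natCast]
    conv_lhs => rw [hxX, hwW]
    rw [PySem.List.slice_natCast_add]
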